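-- pv_equiv track=rewrite | github.com/Afzhal-ahmed-s/Python-DSA | Experiment/NitinC_Ass/Seven.py | intersection_without_duplicates
-- ===== SOURCE A (Python) =====
-- def intersection_without_duplicates(arr1, arr2):
--     arr1.sort()
--     arr2.sort()
--
--     intersection = []
--     i, j = 0, 0
--
--     while i < len(arr1) and j < len(arr2):
--
--         # two supplement while loops to remove the duplicates
--         while i+1 < len(arr1) and arr1[i] == arr1[i+1]:
--             i += 1
--         while j + 1 < len(arr2) and arr2[j] == arr2[j + 1]:
--             j += 1
--
--         if arr1[i] == arr2[j]:
--             intersection.append(arr1[i])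
--             i += 1
--             j += 1
--         elif arr1[i] < arr2[j]:
--             i += 1
--         else:
--             j += 1
--
--     return intersection
-- ===== SOURCE B (Python) =====
-- def intersection_without_duplicates(arr1, arr2):
--     # same in-place sorts as the original (observable mutation preserved)
--     arr1.sort()
--     arr2.sort()
--     s = set(arr2)
--     out = []
--     prev = None
--     for x in arr1:
--         if (prev is None or x != prev) and x in s:
--             out.append(x)
--         prev = x
--     return out
-- ===== Notes on version B (the rewrite author's own statement) =====
-- stated objective: idiomatic
-- what changed: Replaces the synchronized two-pointer merge with duplicate-skipping inner while loops by a single pass over the sorted first array that dedups via the previous element and tests membership in a set built from the second array.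
import Mathlib
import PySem

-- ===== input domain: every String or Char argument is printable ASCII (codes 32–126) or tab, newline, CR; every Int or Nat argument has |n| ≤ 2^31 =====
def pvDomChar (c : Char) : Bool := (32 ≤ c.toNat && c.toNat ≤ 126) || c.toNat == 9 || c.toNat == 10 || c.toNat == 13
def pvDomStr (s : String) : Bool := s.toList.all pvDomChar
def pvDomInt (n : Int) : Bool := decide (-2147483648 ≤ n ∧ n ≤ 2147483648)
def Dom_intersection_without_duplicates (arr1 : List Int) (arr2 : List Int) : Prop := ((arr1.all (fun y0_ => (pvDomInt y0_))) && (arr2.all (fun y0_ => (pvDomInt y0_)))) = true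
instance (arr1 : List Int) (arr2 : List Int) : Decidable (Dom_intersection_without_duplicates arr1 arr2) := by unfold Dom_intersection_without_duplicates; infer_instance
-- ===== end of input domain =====

-- B replaces A's two-pointer merge by one pass over the sorted first array with a set of the
-- second (idiomatic, same cost). Both A and B sort both arguments in place; the theorems below
-- are about the return value (the in-place sorts are identical on both sides).

-- ===== PORT A =====
-- A's inner 'while i+1 < len(arr) and arr[i] == arr[i+1]: i += 1' (duplicate skip).
-- Indexing: every index used is a Nat known to be in range, so List.getD is exact here.
def iwdSkip (arr : List Int) (i : Nat) : Nat :=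
  if i + 1 < arr.length ∧ arr.getD i 0 = arr.getD (i + 1) 0 then
    iwdSkip arr (i + 1)
  else i
termination_by arr.length - i

-- termination facts for the outer while loop (cited by iwdLoop's decreasing_by)
theorem iwdSkip_ge (arr : List Int) (i : Nat) : i ≤ iwdSkip arr i := by
  fun_induction iwdSkip arr i with
  | case1 i h ih => omega
  | case2 i h => omega

theorem iwdSkip_lt (arr : List Int) (i : Nat) (h : i < arr.length) :
    iwdSkip arr i < arr.length := by
  fun_induction iwdSkip arr i with
  | case1 i hc ih => exact ih (by omega)
  | case2 i hc => exact h

-- A's outer while loop over indices i, j and the accumulator list.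
def iwdLoop (a1 a2 : List Int) (i j : Nat) (acc : List Int) : List Int :=
  if h : i < a1.length ∧ j < a2.length then
    if a1.getD (iwdSkip a1 i) 0 = a2.getD (iwdSkip a2 j) 0 then
      iwdLoop a1 a2 (iwdSkip a1 i + 1) (iwdSkip a2 j + 1) (acc ++ [a1.getD (iwdSkip a1 i) 0])
    else if a1.getD (iwdSkip a1 i) 0 < a2.getD (iwdSkip a2 j) 0 then
      iwdLoop a1 a2 (iwdSkip a1 i + 1) (iwdSkip a2 j) acc
    else
      iwdLoop a1 a2 (iwdSkip a1 i) (iwdSkip a2 j + 1) acc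
  else acc
termination_by (a1.length - i) + (a2.length - j)
decreasing_by
  all_goals
    have h1 := iwdSkip_ge a1 i; have h2 := iwdSkip_lt a1 i h.1
    have h3 := iwdSkip_ge a2 j; have h4 := iwdSkip_lt a2 j h.2
    omega

def intersection_without_duplicates (arr1 : List Int) (arr2 : List Int) : List Int :=
  iwdLoop (PySem.List.sorted arr1 (fun x => x)) (PySem.List.sorted arr2 (fun x => x)) 0 0 []

-- ===== PORT B =====
def intersection_without_duplicates_alt (arr1 : List Int) (arr2 : List Int) : List Int :=
  let a1 := PySem.List.sorted arr1 (fun x => x)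
  let a2 := PySem.List.sorted arr2 (fun x => x)
  let s := PySem.Set.ofList a2
  (a1.foldl
    (fun (st : Option Int × List Int) x =>
      (some x,
        if (match st.1 with | none => true | some p => x != p) && s.contains x
        then st.2 ++ [x] else st.2))
    (none, [])).2

-- ===== PRECONDITION & SPEC =====
def Spec_intersection_without_duplicates (arr1 : List Int) (arr2 : List Int) (out : List Int) : Prop := out = intersection_without_duplicates_alt arr1 arr2
instance (arr1 : List Int) (arr2 : List Int) (out : List Int) : Decidable (Spec_intersection_without_duplicates arr1 arr2 out) := by unfold Spec_intersection_without_duplicates; infer_instance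

-- ===== CLAIM (what is proved, stated in full; the proofs are below) =====
def Claim_equal_intersection_without_duplicates : Prop := ∀ (arr1 : List Int) (arr2 : List Int), Dom_intersection_without_duplicates arr1 arr2 → Spec_intersection_without_duplicates arr1 arr2 (intersection_without_duplicates arr1 arr2)

-- ===== LEMMAS AND PROOFS =====

-- List-level mirror of A's loop: state (i, j) is represented by the suffixes a1.drop i, a2.drop j.
def mergeL : List Int → List Int → List Int
  | [], _ => []
  | _ :: _, [] => []
  | a :: as, b :: bs =>
    if a = b then a :: mergeL (as.dropWhile (· == a)) (bs.dropWhile (· == b))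
    else if a < b then mergeL (as.dropWhile (· == a)) (b :: bs.dropWhile (· == b))
    else mergeL (a :: as.dropWhile (· == a)) (bs.dropWhile (· == b))
termination_by la lb => la.length + lb.length
decreasing_by
  · have h1 := List.length_dropWhile_le (· == a) as
    have h2 := List.length_dropWhile_le (· == b) bs
    simp; omega
  · have h1 := List.length_dropWhile_le (· == a) as
    have h2 := List.length_dropWhile_le (· == b) bs
    simp; omega
  · have h1 := List.length_dropWhile_le (· == a) as
    have h2 := List.length_dropWhile_le (· == b) bs
    simp; omega

-- adjacent-duplicate removal (for a sorted list: full dedup)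
def dedupS : List Int → List Int
  | [] => []
  | a :: as => a :: dedupS (as.dropWhile (· == a))
termination_by l => l.length
decreasing_by
  have := List.length_dropWhile_le (· == a) as
  simp; omega

-- B's loop body as a recursive function (prev = previously seen element)
def fdp (s : PySem.Set Int) : List Int → Option Int → List Int
  | [], _ => []
  | x :: xs, prev =>
      (if (match prev with | none => true | some p => x != p) && s.contains x
       then [x] else []) ++ fdp s xs (some x)

-- unfolding equations (mergeL/dedupS are well-founded recursions)
theorem dedupS_cons (a : Int) (as : List Int) :
    dedupS (a :: as) = a :: dedupS (as.dropWhile (· == a)) := by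
  rw [dedupS.eq_def]

-- basic facts about drop
theorem drop_getD (arr : List Int) (i : Nat) (x : Int) (xs : List Int)
    (h : arr.drop i = x :: xs) : arr.getD i 0 = x := by
  have h1 : arr[i]? = some x := by rw [← List.head?_drop, h]; rfl
  simp [List.getD_eq_getElem?_getD, h1]

theorem drop_succ_of (arr : List Int) (i : Nat) (x : Int) (xs : List Int)
    (h : arr.drop i = x :: xs) : arr.drop (i + 1) = xs := by
  have h2 : (arr.drop i).drop 1 = arr.drop (i + 1) := by rw [List.drop_drop]
  rw [← h2, h]; rfl

theorem drop_exists_cons (arr : List Int) (i : Nat) (h : i < arr.length) :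
    ∃ x xs, arr.drop i = x :: xs := by
  cases hd : arr.drop i with
  | nil =>
    have := List.length_drop (l := arr) (i := i)
    rw [hd] at this; simp at this; omega
  | cons x xs => exact ⟨x, xs, rfl⟩

-- the duplicate-skip loop, seen on suffixes
theorem iwdSkip_drop (arr : List Int) (i : Nat) :
    ∀ (x : Int) (xs : List Int), arr.drop i = x :: xs →
      arr.drop (iwdSkip arr i) = x :: xs.dropWhile (· == x) := by
  fun_induction iwdSkip arr i with
  | case1 i hc ih =>
    intro x xs h
    have hx : arr.getD i 0 = x := drop_getD arr i x xs h
    have hxs : arr.drop (i + 1) = xs := drop_succ_of arr i x xs h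
    obtain ⟨y, ys, hys⟩ := drop_exists_cons arr (i + 1) hc.1
    have hy : y = x := by
      have := drop_getD arr (i + 1) y ys hys
      rw [← this, ← hc.2, hx]
    subst hy
    have hxx : xs = y :: ys := by rw [← hxs, hys]
    rw [ih y ys hys, hxx]
    simp [List.dropWhile]
  | case2 i hc =>
    intro x xs h
    rw [h]
    rcases Nat.lt_or_ge (i + 1) arr.length with hlt | hge
    · have hx : arr.getD i 0 = x := drop_getD arr i x xs h
      have hne : arr.getD i 0 ≠ arr.getD (i + 1) 0 := fun he => hc ⟨hlt, he⟩
      obtain ⟨y, ys, hys⟩ := drop_exists_cons arr (i + 1) hlt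
      have hxx : xs = y :: ys := by rw [← drop_succ_of arr i x xs h, hys]
      have hy : arr.getD (i + 1) 0 = y := drop_getD arr (i + 1) y ys hys
      have : ¬ (y == x) = true := by
        simp only [beq_iff_eq]
        intro he; apply hne; rw [hx, hy, he]
      rw [hxx]
      simp [List.dropWhile, this]
    · have : xs = [] := by
        have hxs := drop_succ_of arr i x xs h
        rw [List.drop_eq_nil_of_le hge] at hxs; exact hxs.symm
      simp [this]

-- A's loop equals mergeL on the corresponding suffixes
theorem iwdLoop_eq (a1 a2 : List Int) (i j : Nat) (acc : List Int) :
    iwdLoop a1 a2 i j acc = acc ++ mergeL (a1.drop i) (a2.drop j) := by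
  fun_induction iwdLoop a1 a2 i j acc with
  | case1 i j acc h heq ih =>
    obtain ⟨x, xs, hx⟩ := drop_exists_cons a1 i h.1
    obtain ⟨y, ys, hy⟩ := drop_exists_cons a2 j h.2
    have hsx := iwdSkip_drop a1 i x xs hx
    have hsy := iwdSkip_drop a2 j y ys hy
    have hgx : a1.getD (iwdSkip a1 i) 0 = x := drop_getD _ _ _ _ hsx
    have hgy : a2.getD (iwdSkip a2 j) 0 = y := drop_getD _ _ _ _ hsy
    have hxy : x = y := by rw [← hgx, ← hgy, heq]
    rw [ih, drop_succ_of _ _ _ _ hsx, drop_succ_of _ _ _ _ hsy, hx, hy, hgx]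
    rw [mergeL, if_pos hxy, hxy]
    simp
  | case2 i j acc h heq hlt ih =>
    obtain ⟨x, xs, hx⟩ := drop_exists_cons a1 i h.1
    obtain ⟨y, ys, hy⟩ := drop_exists_cons a2 j h.2
    have hsx := iwdSkip_drop a1 i x xs hx
    have hsy := iwdSkip_drop a2 j y ys hy
    have hgx : a1.getD (iwdSkip a1 i) 0 = x := drop_getD _ _ _ _ hsx
    have hgy : a2.getD (iwdSkip a2 j) 0 = y := drop_getD _ _ _ _ hsy
    have hne : ¬ x = y := by rw [← hgx, ← hgy]; exact heq
    have hl : x < y := by rw [← hgx, ← hgy]; exact hlt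
    rw [ih, drop_succ_of _ _ _ _ hsx, hsy, hx, hy]
    rw [mergeL, if_neg hne, if_pos hl]
  | case3 i j acc h heq hlt ih =>
    obtain ⟨x, xs, hx⟩ := drop_exists_cons a1 i h.1
    obtain ⟨y, ys, hy⟩ := drop_exists_cons a2 j h.2
    have hsx := iwdSkip_drop a1 i x xs hx
    have hsy := iwdSkip_drop a2 j y ys hy
    have hgx : a1.getD (iwdSkip a1 i) 0 = x := drop_getD _ _ _ _ hsx
    have hgy : a2.getD (iwdSkip a2 j) 0 = y := drop_getD _ _ _ _ hsy
    have hne : ¬ x = y := by rw [← hgx, ← hgy]; exact heq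
    have hl : ¬ x < y := by rw [← hgx, ← hgy]; exact hlt
    rw [ih, hsx, drop_succ_of _ _ _ _ hsy, hx, hy]
    rw [mergeL, if_neg hne, if_neg hl]
  | case4 i j acc h =>
    rcases Nat.lt_or_ge i a1.length with h1 | h1
    · have h2 : a2.length ≤ j := by omega
      rw [List.drop_eq_nil_of_le h2]
      obtain ⟨x, xs, hx⟩ := drop_exists_cons a1 i h1
      rw [hx, mergeL]; simp
    · rw [List.drop_eq_nil_of_le h1, mergeL]; simp

-- auxiliary list facts
theorem dropWhile_idem (p : Int → Bool) (l : List Int) :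
    (l.dropWhile p).dropWhile p = l.dropWhile p := by
  induction l with
  | nil => rfl
  | cons x xs ih =>
    by_cases hp : p x
    · simp [List.dropWhile, hp, ih]
    · simp [List.dropWhile, hp]

theorem mem_cons_dropWhile (b : Int) (bs : List Int) (x : Int) :
    x ∈ b :: bs.dropWhile (· == b) ↔ x ∈ b :: bs := by
  induction bs with
  | nil => rfl
  | cons y ys ih =>
    by_cases hy : (y == b) = true
    · have hyb : y = b := by simpa using hy
      subst hyb
      simp only [List.dropWhile, hy]
      rw [ih]
      simp

    · simp [List.dropWhile, hy]

theorem dedupS_subset (l : List Int) : dedupS l ⊆ l := by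
  fun_induction dedupS l with
  | case1 => simp
  | case2 a as ih =>
    intro x hx
    rcases (by simpa [dedupS] using hx : x = a ∨ x ∈ dedupS (as.dropWhile (· == a))) with h | h
    · simp [h]
    · have := (List.dropWhile_sublist (· == a) (l := as)).subset (ih h)
      simp [this]

theorem lt_of_mem_dropWhile (a : Int) (as : List Int)
    (hs : List.Pairwise (· ≤ ·) (a :: as)) :
    ∀ x ∈ as.dropWhile (· == a), a < x := by
  induction as with
  | nil => simp
  | cons y ys ih =>
    by_cases hy : (y == a) = true
    · have hyb : y = a := by simpa using hy
      subst hyb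
      have hs' : List.Pairwise (· ≤ ·) (y :: ys) := by
        refine List.Pairwise.sublist ?_ hs
        exact List.Sublist.cons₂ y (List.sublist_cons_self y ys)
      simpa [List.dropWhile, hy] using ih hs'
    · have hya : ¬ y = a := by simpa using hy
      have hay : a ≤ y := (List.pairwise_cons.mp hs).1 y (by simp)
      have halt : a < y := lt_of_le_of_ne hay (fun h => hya h.symm)
      intro x hx
      rcases (by simpa [List.dropWhile, hy] using hx : x = y ∨ x ∈ ys) with h | h
      · omega
      · have hpy : List.Pairwise (· ≤ ·) (y :: ys) := (List.pairwise_cons.mp hs).2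
        have := (List.pairwise_cons.mp hpy).1 x h
        omega

-- the semantic characterisation of A's merge on sorted inputs
theorem mergeL_filter : ∀ (la lb : List Int),
    la.Pairwise (· ≤ ·) → lb.Pairwise (· ≤ ·) →
    mergeL la lb = (dedupS la).filter (fun x => decide (x ∈ lb)) := by
  intro la lb
  fun_induction mergeL la lb with
  | case1 lb => intro _ _; simp [dedupS]
  | case2 a as => intro _ _; simp [dedupS]
  | case3 as b bs ih =>
    intro ha hb
    have has : List.Pairwise (· ≤ ·) (as.dropWhile (· == b)) :=
      List.Pairwise.sublist (List.dropWhile_sublist _) (List.pairwise_cons.mp ha).2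
    have hbs : List.Pairwise (· ≤ ·) (bs.dropWhile (· == b)) :=
      List.Pairwise.sublist (List.dropWhile_sublist _) (List.pairwise_cons.mp hb).2
    rw [ih has hbs, dedupS_cons]
    have hcongr : ∀ x ∈ dedupS (as.dropWhile (· == b)),
        (decide (x ∈ bs.dropWhile (· == b)) : Bool) = decide (x ∈ b :: bs) := by
      intro x hx
      have hxa : b < x := lt_of_mem_dropWhile b as ha x (dedupS_subset _ hx)
      have hxne : ¬ x = b := by omega
      have := mem_cons_dropWhile b bs x
      simp only [List.mem_cons, hxne, false_or] at this
      simp [this, hxne]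
    rw [List.filter_congr hcongr]
    simp
  | case4 a as b bs hne hlt ih =>
    intro ha hb
    have has : List.Pairwise (· ≤ ·) (as.dropWhile (· == a)) :=
      List.Pairwise.sublist (List.dropWhile_sublist _) (List.pairwise_cons.mp ha).2
    have hbs : List.Pairwise (· ≤ ·) (b :: bs.dropWhile (· == b)) :=
      List.Pairwise.sublist
        (List.Sublist.cons₂ b (List.dropWhile_sublist _)) hb
    rw [ih has hbs, dedupS_cons]
    have hanotin : ¬ a ∈ bs := by
      intro hmem
      have := (List.pairwise_cons.mp hb).1 a hmem
      omega
    have hcongr : ∀ x ∈ dedupS (as.dropWhile (· == a)),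
        (decide (x ∈ b :: bs.dropWhile (· == b)) : Bool) = decide (x ∈ b :: bs) := by
      intro x _
      simp [mem_cons_dropWhile b bs x]
    rw [List.filter_congr hcongr]
    simp [hne, hanotin]
  | case5 a as b bs hne hlt ih =>
    intro ha hb
    have hba : b < a := by
      rcases lt_trichotomy a b with h | h | h
      · exact absurd h hlt
      · exact absurd h hne
      · exact h
    have has' : List.Pairwise (· ≤ ·) (a :: as.dropWhile (· == a)) :=
      List.Pairwise.sublist
        (List.Sublist.cons₂ a (List.dropWhile_sublist _)) ha
    have hbs : List.Pairwise (· ≤ ·) (bs.dropWhile (· == b)) :=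
      List.Pairwise.sublist (List.dropWhile_sublist _) (List.pairwise_cons.mp hb).2
    rw [ih has' hbs]
    have hded : dedupS (a :: as.dropWhile (· == a)) = dedupS (a :: as) := by
      rw [dedupS_cons, dedupS_cons, dropWhile_idem]
    rw [hded]
    have hcongr : ∀ x ∈ dedupS (a :: as),
        (decide (x ∈ bs.dropWhile (· == b)) : Bool) = decide (x ∈ b :: bs) := by
      intro x hx
      have hxb : b < x := by
        rcases (by simpa [dedupS_cons] using hx :
            x = a ∨ x ∈ dedupS (as.dropWhile (· == a))) with h | h
        · omega
        · have := lt_of_mem_dropWhile a as ha x (dedupS_subset _ h)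
          omega
      have hxne : ¬ x = b := by omega
      have := mem_cons_dropWhile b bs x
      simp only [List.mem_cons, hxne, false_or] at this
      simp [this, hxne]
    rw [List.filter_congr hcongr]

-- B's fold equals fdp
theorem foldl_fdp (s : PySem.Set Int) (l : List Int) :
    ∀ (prev : Option Int) (out : List Int),
    (l.foldl
      (fun (st : Option Int × List Int) x =>
        (some x,
          if (match st.1 with | none => true | some p => x != p) && s.contains x
          then st.2 ++ [x] else st.2))
      (prev, out)).2 = out ++ fdp s l prev := by
  induction l with
  | nil => intro prev out; simp [fdp]
  | cons x xs ih =>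
    intro prev out
    simp only [List.foldl_cons, fdp, ih]
    by_cases hc : ((match prev with | none => true | some p => x != p) && s.contains x) = true
    · simp only [hc]
      simp
    · simp only [Bool.not_eq_true] at hc
      simp only [hc]
      simp

theorem fdp_skip (s : PySem.Set Int) : ∀ (as : List Int) (a : Int),
    fdp s as (some a) = fdp s (as.dropWhile (· == a)) none := by
  intro as
  induction as with
  | nil => intro a; rfl
  | cons x xs ih =>
    intro a
    by_cases hx : (x == a) = true
    · have hxa : x = a := by simpa using hx
      subst hxa
      simp only [fdp, List.dropWhile, hx]
      simpa using ih x
    · have hxa : (x != a) = true := by simp_all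
      simp [fdp, List.dropWhile, hx, hxa]

theorem fdp_none (s : PySem.Set Int) (l : List Int) :
    fdp s l none = (dedupS l).filter (fun x => s.contains x) := by
  fun_induction dedupS l with
  | case1 => rfl
  | case2 a as ih =>
    show (if (true && s.contains a) = true then [a] else []) ++ fdp s as (some a) = _
    rw [fdp_skip, ih]
    by_cases hc : s.contains a = true
    · simp only [Bool.true_and, hc, List.filter_cons]
      simp
    · simp only [Bool.true_and, List.filter_cons]
      rw [if_neg hc, if_neg hc]
      simp

-- ===== VERDICT (by name: the statement is the Claim_ definition above) =====
theorem intersection_without_duplicates_spec : Claim_equal_intersection_without_duplicates := by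
  intro arr1 arr2 _
  unfold Spec_intersection_without_duplicates
  unfold intersection_without_duplicates intersection_without_duplicates_alt
  simp only []
  set la := PySem.List.sorted arr1 (fun x => x) with hla
  set lb := PySem.List.sorted arr2 (fun x => x) with hlb
  have hsa : la.Pairwise (· ≤ ·) := PySem.List.sorted_pairwise arr1 (fun x => x)
  have hsb : lb.Pairwise (· ≤ ·) := PySem.List.sorted_pairwise arr2 (fun x => x)
  rw [iwdLoop_eq]
  simp only [List.drop_zero, List.nil_append]
  rw [mergeL_filter la lb hsa hsb, foldl_fdp, List.nil_append, fdp_none]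
  apply List.filter_congr
  intro x _
  have : (PySem.Set.ofList lb).contains x = decide (x ∈ lb) := by
    by_cases hm : x ∈ lb
    · simp [PySem.Set.contains, PySem.Set.mem_ofList, hm]
    · simp [PySem.Set.contains, PySem.Set.mem_ofList, hm]
  rw [this]
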